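-- pv_equiv track=rewrite | github.com/WhitebearStudios/Pygame-Pew-Pew-Tanks | PewPewTanks Pygame/PewPewTanks Current/FileRW.py | get_to_block
-- ===== SOURCE A (Python) =====
-- def get_to_block(str_datas, skip_block = 0):
--     start_line = 1
--     num_lines = 0
--     li=1
--     blocks_to_go = skip_block
--
--     for line in str_datas:
--         if line=="\n":
--             blocks_to_go-=1
--             if blocks_to_go==0:
--                 start_line = li+1 #Line after this one is start of next block
--             if blocks_to_go<0:
--                 num_lines = li-start_line
--                 break
--         li+=1
--
--
--     return start_line, num_lines
-- ===== SOURCE B (Python) =====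
-- def get_to_block(str_datas, skip_block=0):
--     blanks = [i for i, line in enumerate(str_datas, 1) if line == "\n"]
--     if 1 <= skip_block <= len(blanks):
--         start_line = blanks[skip_block - 1] + 1
--     else:
--         start_line = 1
--     e = max(skip_block, 0)
--     if e < len(blanks):
--         num_lines = blanks[e] - start_line
--     else:
--         num_lines = 0
--     return start_line, num_lines
-- ===== Notes on version B (the rewrite author's own statement) =====
-- stated objective: simpler
-- what changed: Replaces A's stateful loop threading a blocks_to_go counter with early break by one comprehension collecting the 1-based positions of blank lines plus two direct index lookups into that table.
import Mathlib
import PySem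

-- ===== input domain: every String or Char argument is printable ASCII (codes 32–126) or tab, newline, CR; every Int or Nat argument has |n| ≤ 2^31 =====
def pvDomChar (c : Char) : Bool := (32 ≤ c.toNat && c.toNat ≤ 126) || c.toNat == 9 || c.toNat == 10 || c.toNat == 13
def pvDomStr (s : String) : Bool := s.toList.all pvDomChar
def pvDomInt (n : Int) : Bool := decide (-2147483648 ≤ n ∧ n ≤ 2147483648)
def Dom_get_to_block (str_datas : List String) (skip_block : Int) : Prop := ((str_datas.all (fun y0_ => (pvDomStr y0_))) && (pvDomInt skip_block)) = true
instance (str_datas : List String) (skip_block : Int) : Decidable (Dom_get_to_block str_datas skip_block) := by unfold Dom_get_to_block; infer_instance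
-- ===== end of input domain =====

-- B replaces A's stateful running-counter loop with an index table of the blank-line positions
-- plus two direct lookups (objective: simpler decomposition, same cost).

-- ===== PORT A =====
-- the for-loop of A with early break, state (start_line, num_lines is always 0 until return, li, blocks_to_go)
def get_to_block_go (l : List String) (start_line li blocks_to_go : Int) : Int × Int :=
  match l with
  | [] => (start_line, 0)
  | line :: rest =>
    if line == "\n" then
      let btg := blocks_to_go - 1
      let start' := if btg == 0 then li + 1 else start_line
      if btg < 0 then (start', li - start')
      else get_to_block_go rest start' (li + 1) btg
    else get_to_block_go rest start_line (li + 1) blocks_to_go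

def get_to_block (str_datas : List String) (skip_block : Int) : Int × Int :=
  get_to_block_go str_datas 1 1 skip_block

-- ===== PORT B =====
-- the comprehension: 1-based positions of the blank separator lines
def blanksOf (l : List String) (i : Int) : List Int :=
  match l with
  | [] => []
  | line :: rest => if line == "\n" then i :: blanksOf rest (i + 1) else blanksOf rest (i + 1)

def get_to_block_alt (str_datas : List String) (skip_block : Int) : Int × Int :=
  let blanks := blanksOf str_datas 1
  let n : Int := blanks.length
  let start_line : Int :=
    if 1 ≤ skip_block ∧ skip_block ≤ n then blanks.getD (skip_block - 1).toNat 0 + 1 else 1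
  let e : Int := max skip_block 0
  let num_lines : Int := if e < n then blanks.getD e.toNat 0 - start_line else 0
  (start_line, num_lines)

-- ===== PRECONDITION & SPEC =====
def Spec_get_to_block (str_datas : List String) (skip_block : Int) (out : Int × Int) : Prop := out = get_to_block_alt str_datas skip_block
instance (str_datas : List String) (skip_block : Int) (out : Int × Int) : Decidable (Spec_get_to_block str_datas skip_block out) := by unfold Spec_get_to_block; infer_instance

-- ===== CLAIM (what is proved, stated in full; the proofs are below) =====
def Claim_equal_get_to_block : Prop := ∀ (str_datas : List String) (skip_block : Int), Dom_get_to_block str_datas skip_block → Spec_get_to_block str_datas skip_block (get_to_block str_datas skip_block)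

-- ===== LEMMAS AND PROOFS =====

-- Invariant relating A's loop to the blank-position table of the remaining lines.
theorem go_eq (l : List String) : ∀ (start li btg : Int),
    get_to_block_go l start li btg =
      (let blanks := blanksOf l li
       let n : Int := blanks.length
       let start' : Int := if 1 ≤ btg ∧ btg ≤ n then blanks.getD (btg - 1).toNat 0 + 1 else start
       let e : Int := max btg 0
       (start', if e < n then blanks.getD e.toNat 0 - start' else 0)) := by
  induction l with
  | nil =>
    intro start li btg
    simp only [get_to_block_go, blanksOf, List.length_nil]
    have h1 : ¬ (1 ≤ btg ∧ btg ≤ (0 : Int)) := by omega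
    have h2 : ¬ (max btg 0 < (0 : Int)) := by omega
    simp [h1, h2]
  | cons line rest ih =>
    intro start li btg
    by_cases hline : line = "\n"
    · subst hline
      simp only [get_to_block_go, blanksOf, beq_self_eq_true, if_true]
      by_cases hneg : btg - 1 < 0
      · -- break case: btg ≤ 0
        have hne : ¬ (btg - 1 == 0) = true := by simp; omega
        have hc : ¬ (1 ≤ btg ∧ btg ≤ ((li :: blanksOf rest (li+1)).length : Int)) := by
          simp only [List.length_cons]; omega
        have he : max btg 0 = 0 := by omega
        simp only [if_pos hneg, if_neg hne, if_neg hc, he]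
        have hl : (0 : Int) < ((li :: blanksOf rest (li+1)).length : Int) := by
          simp only [List.length_cons]; push_cast; omega
        simp only [if_pos hl, List.getD_cons_zero,
          show ((0:Int)).toNat = 0 from rfl]
      · by_cases hz : btg - 1 = 0
        · -- btg = 1 : start_line is set at this blank line
          have h1 : btg = 1 := by omega
          subst h1
          simp only [if_neg hneg, show (((1:Int) - 1) == 0) = true from by decide, if_true]
          rw [ih]
          simp only [List.length_cons]
          rw [show ((1:Int) - 1) = 0 from by decide]
          rw [show (max (0:Int) 0) = 0 from by decide, show (max (1:Int) 0) = 1 from by decide]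
          rw [show ((0:Int)).toNat = 0 from rfl, show ((1:Int)).toNat = 1 from rfl]
          simp only [List.getD_cons_zero, List.getD_cons_succ]
          push_cast
          simp only [Prod.mk.injEq, false_and, true_and, if_false]
          split_ifs <;> omega
        · -- btg ≥ 2 : the blank is consumed, counter decremented
          have h2 : 2 ≤ btg := by omega
          have hne : ¬ (btg - 1 == 0) = true := by simp; omega
          simp only [if_neg hneg, if_neg hne]
          rw [ih]
          simp only [List.length_cons]
          rw [show max btg 0 = btg from by omega, show max (btg - 1) 0 = btg - 1 from by omega]
          have hg1 : ((li :: blanksOf rest (li+1)).getD (btg - 1).toNat 0) =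
              ((blanksOf rest (li+1)).getD (btg - 1 - 1).toNat 0) := by
            have h : (btg - 1).toNat = (btg - 1 - 1).toNat + 1 := by omega
            rw [h, List.getD_cons_succ]
          have hg2 : ((li :: blanksOf rest (li+1)).getD btg.toNat 0) =
              ((blanksOf rest (li+1)).getD (btg - 1).toNat 0) := by
            have h : btg.toNat = (btg - 1).toNat + 1 := by omega
            rw [h, List.getD_cons_succ]
          rw [hg1, hg2]
          push_cast
          simp only [Prod.mk.injEq]
          split_ifs <;> omega
    · have hbe : (line == "\n") = false := by simp [hline]
      simp only [get_to_block_go, blanksOf, hbe, Bool.false_eq_true]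
      exact ih start (li + 1) btg

-- ===== VERDICT (by name: the statement is the Claim_ definition above) =====
theorem get_to_block_spec : Claim_equal_get_to_block := by
  intro str_datas skip_block _
  unfold Spec_get_to_block get_to_block get_to_block_alt
  rw [go_eq]
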